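-- pv_equiv track=rewrite | github.com/PhilippIcking/AdventOfCode2023 | 14.py | south
-- ===== SOURCE A (Python) =====
-- def south(dish):
--     # South
--     rock_count = 0
--     for x in range(len(dish[0])):
--         for y in range(len(dish)):
--             if dish[y][x] == "#" and rock_count > 0:
--                 dish[y-1][x] = rock_count
--                 for z in range(rock_count):
--                     dish[y - 1 - z][x] = "O"
--                 rock_count = 0
--             elif dish[y][x] == "O":
--                 rock_count += 1
--                 dish[y][x] = "."
--             if y == (len(dish)-1) and rock_count > 0:
--                 dish[y][x] = rock_count
--                 for z in range(rock_count):
--                     dish[y - z][x] = "O"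
--                 rock_count = 0
--     return dish
-- ===== SOURCE B (Python) =====
-- def south(dish):
--     # Column-wise segment rewrite: split each column at '#', sink the 'O's to the
--     # bottom of each segment, and write the column back in place.
--     for x in range(len(dish[0])):
--         col = [row[x] for row in dish]
--         out = []
--         seg = []
--         for c in col + ["#"]:
--             if c == "#":
--                 k = seg.count("O")
--                 body = ["." if ch == "O" else ch for ch in seg]
--                 if k > 0:
--                     body[len(body) - k:] = ["O"] * k
--                 out += body + ["#"]
--                 seg = []
--             else:
--                 seg.append(c)
--         for y, c in enumerate(out[:-1]):
--             dish[y][x] = c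
--     return dish
-- ===== Notes on version B (the rewrite author's own statement) =====
-- stated objective: alternative
-- what changed: Replaces A's stateful cell-by-cell column scan (rock counter plus backward in-place overwrite bursts) by extracting each column, splitting it at '#' into segments, rewriting each segment as its non-O cells followed by its O-count rocks, and writing the column back; Pre_ excludes only the inputs where A raises IndexError (empty dish or a row shorter than row 0), where B raises too.
import Mathlib
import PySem

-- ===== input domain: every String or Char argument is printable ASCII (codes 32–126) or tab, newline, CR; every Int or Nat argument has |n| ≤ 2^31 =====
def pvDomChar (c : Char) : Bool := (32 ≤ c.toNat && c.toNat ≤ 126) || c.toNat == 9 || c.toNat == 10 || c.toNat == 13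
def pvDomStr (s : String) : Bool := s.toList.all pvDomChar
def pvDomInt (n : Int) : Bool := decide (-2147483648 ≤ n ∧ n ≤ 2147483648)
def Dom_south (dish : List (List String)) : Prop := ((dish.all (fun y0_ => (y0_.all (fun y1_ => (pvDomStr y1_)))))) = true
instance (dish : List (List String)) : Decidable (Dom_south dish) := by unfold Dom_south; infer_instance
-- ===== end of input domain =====

-- B tilts each column by splitting it at '#' into segments and sinking the 'O's to each
-- segment's bottom, instead of A's stateful cell-by-cell scan; both mutate `dish` in place
-- in Python (identically); the equivalence proved here is about the returned value.


-- ===== PORT A =====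
-- dish[i][x] = v  (Int index; negative wrap and silent no-op only outside Pre_)
def setCell (d : List (List String)) (i : Int) (x : Nat) (v : String) : List (List String) :=
  PySem.List.pySetD d i ((PySem.List.pyGetD d i []).set x v)

-- the body of A's loop over y, for column x of a grid with n rows; state = (dish, rock_count)
def southStep (n : Nat) (x : Nat) (st : List (List String) × Nat) (y : Nat) :
    List (List String) × Nat :=
  let d := st.1
  let rc := st.2
  let st1 : List (List String) × Nat :=
    if ((d.getD y []).getD x "") = "#" ∧ 0 < rc then
      -- `dish[y-1][x] = rock_count` stores an int that the z = 0 write below always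
      -- overwrites; the String cell type forces str(rock_count) for the dead value
      let d1 := setCell d ((y : Int) - 1) x (PySem.Int.toStr (rc : Int))
      let d2 := (List.range rc).foldl (fun d (z : Nat) => setCell d ((y : Int) - 1 - (z : Int)) x "O") d1
      (d2, 0)
    else if ((d.getD y []).getD x "") = "O" then
      (setCell d (y : Int) x ".", rc + 1)
    else (d, rc)
  let d' := st1.1
  let rc' := st1.2
  if y = n - 1 ∧ 0 < rc' then
    let d1 := setCell d' (y : Int) x (PySem.Int.toStr (rc' : Int))
    let d2 := (List.range rc').foldl (fun d (z : Nat) => setCell d ((y : Int) - (z : Int)) x "O") d1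
    (d2, 0)
  else (d', rc')

def south (dish : List (List String)) : List (List String) :=
  ((List.range (dish.headD []).length).foldl
      (fun st x => (List.range dish.length).foldl (southStep dish.length x) st)
      (dish, 0)).1

-- ===== PORT B =====
-- body = seg with 'O' cells dotted out, then (if any) the last k cells overwritten by 'O'
def segBody (seg : List String) : List String :=
  let k := seg.count "O"
  let b := seg.map (fun ch => if ch = "O" then "." else ch)
  if 0 < k then b.take (b.length - k) ++ List.replicate k "O" else b

-- the `for c in col + ["#"]` loop of Source B, returning the finished `out`
def tiltFold (col : List String) : List String :=
  ((col ++ ["#"]).foldl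
      (fun (st : List String × List String) c =>
        if c = "#" then (st.1 ++ segBody st.2 ++ ["#"], []) else (st.1, st.2 ++ [c]))
      ([], [])).1

def south_alt (dish : List (List String)) : List (List String) :=
  (List.range (dish.headD []).length).foldl
    (fun d x =>
      let col := d.map (fun row => row.getD x "")
      let out := tiltFold col
      -- `for y, c in enumerate(out[:-1]): dish[y][x] = c`
      (PySem.List.enumerate out.dropLast 0).foldl (fun d p => setCell d p.1 x p.2) d)
    dish

-- ===== PRECONDITION & SPEC =====
-- Pre_ excludes exactly the inputs on which A raises IndexError: the empty dish
-- (dish[0]) and grids where some row is shorter than row 0 (the read dish[y][x]).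
def Pre_south (dish : List (List String)) : Prop :=
  dish ≠ [] ∧ ∀ row ∈ dish, (dish.headD []).length ≤ row.length
instance (dish : List (List String)) : Decidable (Pre_south dish) := by
  unfold Pre_south; infer_instance

def pvWitness_south : List (List String) := [["O", "."], [".", "#"], [".", "O"]]

def Spec_south (dish : List (List String)) (out : List (List String)) : Prop := out = south_alt dish
instance (dish : List (List String)) (out : List (List String)) : Decidable (Spec_south dish out) := by unfold Spec_south; infer_instance

-- ===== CLAIM (what is proved, stated in full; the proofs are below) =====
def Claim_equal_south : Prop :=
  ∀ (dish : List (List String)), Dom_south dish → Pre_south dish → Spec_south dish (south dish)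

-- ===== LEMMAS AND PROOFS =====

-- `dish` restricted to column x, with the whole column replaced by c
def zipW (d : List (List String)) (x : Nat) (c : List String) : List (List String) :=
  List.zipWith (fun row cv => row.set x cv) d c

-- the pure one-column machine corresponding to A's y-loop
def stepP (n : Nat) (st : List String × Nat) (y : Nat) : List String × Nat :=
  let c := st.1
  let rc := st.2
  let st1 : List String × Nat :=
    if c.getD y "" = "#" ∧ 0 < rc then
      let c1 := PySem.List.pySetD c ((y : Int) - 1) (PySem.Int.toStr (rc : Int))
      let c2 := (List.range rc).foldl (fun v (z : Nat) => PySem.List.pySetD v ((y : Int) - 1 - (z : Int)) "O") c1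
      (c2, 0)
    else if c.getD y "" = "O" then (PySem.List.pySetD c (y : Int) ".", rc + 1)
    else (c, rc)
  let c' := st1.1
  let rc' := st1.2
  if y = n - 1 ∧ 0 < rc' then
    let c1 := PySem.List.pySetD c' (y : Int) (PySem.Int.toStr (rc' : Int))
    let c2 := (List.range rc').foldl (fun v (z : Nat) => PySem.List.pySetD v ((y : Int) - (z : Int)) "O") c1
    (c2, 0)
  else (c', rc')

def dotC (s : String) : String := if s = "O" then "." else s

-- recursive specification of one tilted column (with a pending open segment)
def tilt : List String → List String → List String
  | seg, [] => segBody seg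
  | seg, c :: cs => if c = "#" then segBody seg ++ "#" :: tilt [] cs else tilt (seg ++ [c]) cs

lemma length_segBody (seg : List String) : (segBody seg).length = seg.length := by
  have hk : seg.count "O" ≤ seg.length := List.count_le_length
  simp only [segBody]
  split_ifs with h
  · simp; omega
  · simp only [List.length_map]

lemma length_tilt (seg rest : List String) : (tilt seg rest).length = seg.length + rest.length := by
  induction rest generalizing seg with
  | nil => simp [tilt, length_segBody]
  | cons c cs ih =>
    simp only [tilt]
    split_ifs with h
    · simp [length_segBody, ih]
    · simp [length_segBody, ih]
      omega

-- tiltFold's fold, with arbitrary accumulators, computes tilt plus a trailing "#"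
lemma tiltFold_aux (rest : List String) : ∀ out seg,
    ((rest ++ ["#"]).foldl
        (fun (st : List String × List String) c =>
          if c = "#" then (st.1 ++ segBody st.2 ++ ["#"], []) else (st.1, st.2 ++ [c]))
        (out, seg)).1 = out ++ tilt seg rest ++ ["#"] := by
  induction rest with
  | nil => intro out seg; simp [tilt]
  | cons c cs ih =>
    intro out seg
    by_cases h : c = "#"
    · subst h
      simp only [List.cons_append, List.foldl_cons, if_pos rfl, ih, tilt]
      simp
    · simp only [List.cons_append, List.foldl_cons, if_neg h, ih, tilt, if_neg h]

lemma tiltFold_eq (col : List String) : (tiltFold col).dropLast = tilt [] col := by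
  simp only [tiltFold, tiltFold_aux col [] [], List.nil_append, List.dropLast_concat]

lemma getD_append_mid {α : Type} (pre : List α) (c : α) (suf : List α) (d : α) :
    (pre ++ c :: suf).getD pre.length d = c := by
  induction pre with
  | nil => simp
  | cons a pre ih => simpa using ih

lemma set_append_mid {α : Type} (pre mid suf : List α) (k : Nat) (hk : k < mid.length) (v : α) :
    (pre ++ (mid ++ suf)).set (pre.length + k) v = pre ++ (mid.set k v ++ suf) := by
  rw [List.set_append, if_neg (by omega), List.set_append, if_pos (by omega),
    Nat.add_sub_cancel_left]

lemma set_append_len {α : Type} (pre : List α) (c v : α) (suf : List α) :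
    (pre ++ c :: suf).set pre.length v = pre ++ v :: suf := by
  induction pre with
  | nil => rfl
  | cons a pre ih => simpa using ih

lemma take_set_ge (l : List String) (i k : Nat) (h : k ≤ i) (v : String) :
    (l.set i v).take k = l.take k := List.take_set_of_le h

-- A's backward write burst paints exactly the rc cells above (and at) index y-1
lemma placeAux (rc : Nat) : ∀ (pre mid suf : List String) (y : Nat), mid.length = rc →
    y = pre.length + rc →
    (List.range rc).foldl (fun v (z : Nat) => PySem.List.pySetD v ((y : Int) - 1 - (z : Int)) "O")
      (pre ++ (mid ++ suf))
    = pre ++ (List.replicate rc "O" ++ suf) := by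
  induction rc with
  | zero =>
    intro pre mid suf y hm hy
    rw [List.length_eq_zero_iff] at hm
    subst hm
    simp
  | succ rc ih =>
    intro pre mid suf y hm hy
    cases mid with
    | nil => simp at hm
    | cons m0 mid' =>
      rw [List.range_succ, List.foldl_append, List.foldl_cons, List.foldl_nil]
      have h1 : pre ++ (m0 :: mid' ++ suf) = (pre ++ [m0]) ++ (mid' ++ suf) := by simp
      rw [h1, ih (pre ++ [m0]) mid' suf y (by simpa using hm) (by simp; omega)]
      have h2 : ((y : Int) - 1 - (rc : Int)) = ((pre.length : Nat) : Int) := by push_cast; omega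
      rw [h2, PySem.List.pySetD_natCast, List.append_assoc pre [m0], List.singleton_append,
        set_append_len]
      simp [List.replicate_succ]

lemma placeAux' (rc : Nat) (pre mid suf : List String) (y : Nat) (hm : mid.length = rc)
    (hy : y + 1 = pre.length + rc) :
    (List.range rc).foldl (fun v (z : Nat) => PySem.List.pySetD v ((y : Int) - (z : Int)) "O")
      (pre ++ (mid ++ suf))
    = pre ++ (List.replicate rc "O" ++ suf) := by
  have hfun : (fun (v : List String) (z : Nat) => PySem.List.pySetD v ((y : Int) - (z : Int)) "O")
      = fun (v : List String) (z : Nat) =>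
          PySem.List.pySetD v (((y + 1 : Nat) : Int) - 1 - (z : Int)) "O" := by
    funext v z
    congr 1
    push_cast
    ring
  rw [hfun, placeAux rc pre mid suf (y + 1) hm (by omega)]

lemma segBody_snoc (seg : List String) (c : String) :
    segBody (seg ++ [c])
    = if c = "O" then
        (seg.map dotC).take (seg.length - seg.count "O") ++ List.replicate (seg.count "O" + 1) "O"
      else if 0 < seg.count "O" then
        (seg.map dotC).take (seg.length + 1 - seg.count "O") ++ List.replicate (seg.count "O") "O"
      else seg.map dotC ++ [c] := by
  have hcnt : seg.count "O" ≤ seg.length := List.count_le_length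
  have hdot : seg.map (fun ch => if ch = "O" then "." else ch) = seg.map dotC := rfl
  by_cases hco : c = "O"
  · subst hco
    have hcnt2 : List.count "O" (seg ++ ["O"]) = seg.count "O" + 1 := by simp
    have hmap : List.map (fun ch => if ch = "O" then "." else ch) (seg ++ ["O"])
        = seg.map dotC ++ ["."] := by simp [hdot]
    rw [if_pos rfl]
    simp only [segBody, hcnt2, hmap]
    rw [if_pos (by omega), List.take_append_of_le_length (by simp [hcnt2])]
    congr 2
    simp [hcnt2]
  · have hcnt2 : List.count "O" (seg ++ [c]) = seg.count "O" := by simp [hco]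
    have hmap : List.map (fun ch => if ch = "O" then "." else ch) (seg ++ [c])
        = seg.map dotC ++ [c] := by simp [hdot, hco]
    rw [if_neg hco]
    simp only [segBody, hcnt2, hmap]
    by_cases hrc : 0 < seg.count "O"
    · have hside : (List.map dotC seg ++ [c]).length - List.count "O" seg
          ≤ (List.map dotC seg).length := by
        simp only [List.length_append, List.length_map, List.length_singleton]
        omega
      rw [if_pos hrc, if_pos hrc, List.take_append_of_le_length hside]
      congr 2
      simp
    · rw [if_neg hrc, if_neg hrc]

-- one stepP step from the canonical mid-column state
lemma stepP_stage (n : Nat) (out seg : List String) (c : String) (cs : List String)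
    (hn : n = out.length + seg.length + 1 + cs.length) :
    stepP n (out ++ (seg.map dotC ++ c :: cs), seg.count "O") (out.length + seg.length)
    = if cs = [] then (out ++ tilt seg [c], 0)
      else if c = "#" then (out ++ (segBody seg ++ "#" :: cs), 0)
      else (out ++ ((seg ++ [c]).map dotC ++ cs), (seg ++ [c]).count "O") := by
  have hcnt : seg.count "O" ≤ seg.length := List.count_le_length
  have hread : (out ++ (seg.map dotC ++ c :: cs)).getD (out.length + seg.length) "" = c := by
    have h := getD_append_mid (out ++ seg.map dotC) c cs ""
    simpa [List.append_assoc] using h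
  have hdot : seg.map (fun ch => if ch = "O" then "." else ch) = seg.map dotC := rfl
  simp only [stepP, hread]
  by_cases hc : c = "#"
  · by_cases hrc : 0 < seg.count "O"
    · rw [if_pos (show c = "#" ∧ 0 < List.count "O" seg from ⟨hc, hrc⟩)]
      rw [if_neg (by simp)]
      have h1 : ((out.length + seg.length : Nat) : Int) - 1
          = ((out.length + (seg.length - 1) : Nat) : Int) := by push_cast; omega
      rw [h1, PySem.List.pySetD_natCast,
        set_append_mid out (List.map dotC seg) (c :: cs) (seg.length - 1) (by simp; omega) _]
      have hsplit : out ++ ((List.map dotC seg).set (seg.length - 1)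
              (PySem.Int.toStr (seg.count "O" : Int)) ++ c :: cs)
          = (out ++ ((List.map dotC seg).set (seg.length - 1)
                (PySem.Int.toStr (seg.count "O" : Int))).take (seg.length - seg.count "O"))
            ++ (((List.map dotC seg).set (seg.length - 1)
                (PySem.Int.toStr (seg.count "O" : Int))).drop (seg.length - seg.count "O")
              ++ c :: cs) := by
        simp only [List.append_assoc]
        congr 1
        rw [← List.append_assoc, List.take_append_drop]
      rw [hsplit, placeAux' (seg.count "O") _ _ _ _ (by simp; omega) (by simp; omega)]
      rw [take_set_ge _ _ _ (by omega)]
      subst hc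
      by_cases hcs : cs = []
      · subst hcs
        rw [if_pos rfl]
        simp [tilt, segBody, hrc, hdot, List.append_assoc]
      · rw [if_neg hcs, if_pos rfl]
        simp [segBody, hrc, hdot, List.append_assoc]
    · rw [if_neg (show ¬(c = "#" ∧ 0 < List.count "O" seg) from fun h => hrc h.2)]
      rw [if_neg (show ¬(c = "O") from by simp [hc])]
      have hc0 : List.count "O" seg = 0 := by omega
      rw [if_neg (by simp [hc0])]
      subst hc
      by_cases hcs : cs = []
      · subst hcs
        rw [if_pos rfl]
        simp [tilt, segBody, hc0, hdot]
      · rw [if_neg hcs, if_pos rfl]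
        simp [segBody, hc0, hdot]
  · rw [if_neg (show ¬(c = "#" ∧ 0 < List.count "O" seg) from fun h => hc h.1)]
    by_cases hco : c = "O"
    · rw [if_pos hco]
      subst hco
      rw [PySem.List.pySetD_natCast]
      have hv : out ++ (List.map dotC seg ++ "O" :: cs)
          = out ++ ((List.map dotC seg ++ ["O"]) ++ cs) := by simp
      rw [hv, set_append_mid out (List.map dotC seg ++ ["O"]) cs seg.length (by simp) _]
      have hsetc : (List.map dotC seg ++ ["O"]).set seg.length "."
          = List.map dotC seg ++ ["."] := by
        rw [List.set_append, if_neg (by simp)]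
        simp
      rw [hsetc]
      by_cases hcs : cs = []
      · subst hcs
        rw [if_pos (show out.length + seg.length = n - 1 ∧ 0 < List.count "O" seg + 1 from
          ⟨by simp at hn; omega, by omega⟩)]
        rw [PySem.List.pySetD_natCast]
        rw [set_append_mid out (List.map dotC seg ++ ["."]) [] seg.length (by simp) _]
        have hsetc2 : (List.map dotC seg ++ ["."]).set seg.length
              (PySem.Int.toStr ((List.count "O" seg + 1 : Nat) : Int))
            = List.map dotC seg ++ [PySem.Int.toStr ((List.count "O" seg + 1 : Nat) : Int)] := by
          rw [List.set_append, if_neg (by simp)]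
          simp
        rw [hsetc2]
        have hsplit2 : out ++ ((List.map dotC seg
                ++ [PySem.Int.toStr ((List.count "O" seg + 1 : Nat) : Int)]) ++ ([] : List String))
            = (out ++ (List.map dotC seg).take (seg.length - seg.count "O"))
              ++ (((List.map dotC seg).drop (seg.length - seg.count "O")
                  ++ [PySem.Int.toStr ((List.count "O" seg + 1 : Nat) : Int)]) ++ ([] : List String)) := by
          simp only [List.append_assoc, List.append_nil]
          congr 1
          conv_rhs => rw [← List.append_assoc, List.take_append_drop]
        rw [hsplit2, placeAux' (seg.count "O" + 1) _ _ _ _ (by simp; omega) (by simp; omega)]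
        simp [tilt, segBody_snoc, List.append_assoc]
      · rw [if_neg (by
          rintro ⟨h1, -⟩
          exact hcs (List.length_eq_zero_iff.mp (by omega)))]
        rw [if_neg hcs, if_neg hc]
        simp [dotC, List.count_append, List.append_assoc]
    · rw [if_neg hco]
      by_cases hcs : cs = []
      · subst hcs
        by_cases hrc : 0 < seg.count "O"
        · rw [if_pos (show out.length + seg.length = n - 1 ∧ 0 < List.count "O" seg from
            ⟨by simp at hn; omega, hrc⟩)]
          rw [PySem.List.pySetD_natCast]
          have hv : out ++ (List.map dotC seg ++ c :: ([] : List String))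
              = out ++ ((List.map dotC seg ++ [c]) ++ ([] : List String)) := by simp
          rw [hv, set_append_mid out (List.map dotC seg ++ [c]) [] seg.length (by simp) _]
          have hsetc3 : (List.map dotC seg ++ [c]).set seg.length
                (PySem.Int.toStr ((List.count "O" seg : Nat) : Int))
              = List.map dotC seg ++ [PySem.Int.toStr ((List.count "O" seg : Nat) : Int)] := by
            rw [List.set_append, if_neg (by simp)]
            simp
          rw [hsetc3]
          have hsplit3 : out ++ ((List.map dotC seg
                  ++ [PySem.Int.toStr ((List.count "O" seg : Nat) : Int)]) ++ ([] : List String))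
              = (out ++ (List.map dotC seg).take (seg.length + 1 - seg.count "O"))
                ++ (((List.map dotC seg).drop (seg.length + 1 - seg.count "O")
                    ++ [PySem.Int.toStr ((List.count "O" seg : Nat) : Int)]) ++ ([] : List String)) := by
            simp only [List.append_assoc, List.append_nil]
            congr 1
            conv_rhs => rw [← List.append_assoc, List.take_append_drop]
          rw [hsplit3, placeAux' (seg.count "O") _ _ _ _ (by simp; omega) (by simp; omega)]
          simp [tilt, segBody_snoc, hco, hc, hrc, List.append_assoc]
        · rw [if_neg (by rintro ⟨-, h2⟩; omega)]
          rw [if_pos rfl]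
          have hc0 : List.count "O" seg = 0 := by omega
          simp [tilt, segBody_snoc, hco, hc, hc0, List.append_assoc]
      · rw [if_neg (by
          rintro ⟨h1, -⟩
          exact hcs (List.length_eq_zero_iff.mp (by omega)))]
        rw [if_neg hcs, if_neg hc]
        simp [dotC, hco, List.count_append, List.append_assoc]

-- the pure machine, run over the remaining indices, computes tilt
lemma pure_main (rest : List String) : ∀ (out seg : List String) (n y : Nat), rest ≠ [] →
    y = out.length + seg.length → n = y + rest.length →
    (List.range' y rest.length 1).foldl (stepP n)
        (out ++ (seg.map dotC ++ rest), seg.count "O")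
    = (out ++ tilt seg rest, 0) := by
  induction rest with
  | nil => intro out seg n y h _ _; exact absurd rfl h
  | cons c cs ih =>
    intro out seg n y _ hy hn
    subst hy
    rw [show (c :: cs).length = cs.length + 1 from rfl, List.range'_succ, List.foldl_cons]
    rw [stepP_stage n out seg c cs (by simp at hn; omega)]
    by_cases hcs : cs = []
    · subst hcs
      rw [if_pos rfl]
      simp
    · rw [if_neg hcs]
      by_cases hc2 : c = "#"
      · subst hc2
        rw [if_pos rfl]
        have h2 := ih (out ++ segBody seg ++ ["#"]) [] n (out.length + seg.length + 1) hcs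
          (by simp [length_segBody]; omega) (by simp at hn ⊢; omega)
        simp only [List.map_nil, List.nil_append, List.count_nil, List.append_assoc,
          List.cons_append, List.append_nil] at h2
        rw [h2]
        simp [tilt, List.append_assoc]
      · rw [if_neg hc2]
        have h2 := ih out (seg ++ [c]) n (out.length + seg.length + 1) hcs
          (by simp; omega) (by simp at hn ⊢; omega)
        rw [h2]
        simp [tilt, hc2]

lemma length_zipW (d : List (List String)) (x : Nat) (c : List String)
    (h : c.length = d.length) : (zipW d x c).length = d.length := by
  simp [zipW, h]

lemma zipW_self (d : List (List String)) (x : Nat) (hx : ∀ row ∈ d, x < row.length) :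
    zipW d x (d.map (fun row => row.getD x "")) = d := by
  induction d with
  | nil => rfl
  | cons r d ih =>
    have hr : x < r.length := hx r (by simp)
    simp only [zipW, List.map_cons, List.zipWith_cons_cons]
    rw [List.getD_eq_getElem r "" hr, List.set_getElem_self]
    exact congrArg (r :: ·) (ih (fun row hrow => hx row (by simp [hrow])))

lemma read_zipW (d : List (List String)) (x : Nat) (c : List String) (y : Nat)
    (h : c.length = d.length) (hy : y < d.length) (hx : ∀ row ∈ d, x < row.length) :
    ((zipW d x c).getD y []).getD x "" = c.getD y "" := by
  have hy2 : y < (zipW d x c).length := by rw [length_zipW d x c h]; exact hy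
  have hy3 : y < c.length := by omega
  rw [List.getD_eq_getElem _ _ hy2, List.getD_eq_getElem _ _ hy3]
  simp only [zipW, List.getElem_zipWith]
  have hxr : x < (d[y]).length := hx (d[y]) (List.getElem_mem _)
  rw [List.getD_eq_getElem _ _ (by simpa using hxr), List.getElem_set_self]

lemma pyIdx?_cases (n : Nat) (i : Int) :
    (PySem.List.pyIdx? n i = none ∧ ¬ PySem.Raise.InRange n i)
    ∨ ∃ k, PySem.List.pyIdx? n i = some k ∧ k < n := by
  simp only [PySem.List.pyIdx?, PySem.Raise.InRange]
  split_ifs with h1 h2 h3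
  · right; exact ⟨i.toNat, rfl, by omega⟩
  · left; exact ⟨rfl, by omega⟩
  · right; exact ⟨n - (-i).toNat, rfl, by omega⟩
  · left; exact ⟨rfl, by omega⟩

lemma setCell_zipW (d : List (List String)) (x : Nat) (c : List String) (i : Int) (v : String)
    (h : c.length = d.length) :
    setCell (zipW d x c) i x v = zipW d x (PySem.List.pySetD c i v) := by
  have hlz : (zipW d x c).length = d.length := length_zipW d x c h
  rcases pyIdx?_cases d.length i with ⟨hnone, -⟩ | ⟨k, hsome, hk⟩
  · simp [setCell, PySem.List.pySetD, PySem.List.pySet?, hlz, h, hnone]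
  · have hkc : k < c.length := by omega
    have hkz : k < (zipW d x c).length := by omega
    simp only [setCell, PySem.List.pySetD, PySem.List.pySet?, PySem.List.pyGetD,
      PySem.List.pyGet?, hlz, h, hsome, Option.map_some]
    simp only [Option.bind_some, Option.getD_some, List.getElem?_eq_getElem hkz]
    simp only [zipW, List.getElem_zipWith]
    apply List.ext_getElem
    · simp [h]
    · intro j hj1 hj2
      have hjd : j < d.length := by simpa [h] using hj2
      have hjc : j < c.length := by omega
      rw [List.getElem_set]
      by_cases hjk : k = j
      · subst hjk
        rw [if_pos rfl, List.set_set, List.getElem_zipWith, List.getElem_set_self]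
      · rw [if_neg hjk, List.getElem_zipWith, List.getElem_zipWith, List.getElem_set_ne hjk]

lemma fold_set_zipW (d : List (List String)) (x : Nat)
    (l : List Nat) (f : Nat → Int) : ∀ (c : List String), c.length = d.length →
    l.foldl (fun D z => setCell D (f z) x "O") (zipW d x c)
    = zipW d x (l.foldl (fun v z => PySem.List.pySetD v (f z) "O") c) := by
  induction l with
  | nil => intro c hc; rfl
  | cons z l ih =>
    intro c hc
    simp only [List.foldl_cons]
    rw [setCell_zipW d x c (f z) "O" hc]
    exact ih _ (by rw [PySem.List.length_pySetD]; exact hc)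

lemma length_foldl_pySetD (l : List Nat) (f : Nat → Int) (v0 : String) : ∀ (c : List String),
    (l.foldl (fun v z => PySem.List.pySetD v (f z) v0) c).length = c.length := by
  induction l with
  | nil => intro c; rfl
  | cons z l ih =>
    intro c
    simp only [List.foldl_cons]
    rw [ih, PySem.List.length_pySetD]

lemma length_stepP (n : Nat) (c : List String) (rc y : Nat) :
    (stepP n (c, rc) y).1.length = c.length := by
  simp only [stepP]
  split_ifs <;>
    simp [length_foldl_pySetD, PySem.List.length_pySetD]

-- one step of A's 2-D loop is the pure machine on the column
lemma step_lift (d0 : List (List String)) (x : Nat) (hx : ∀ row ∈ d0, x < row.length)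
    (c : List String) (rc y : Nat) (h : c.length = d0.length) (hy : y < d0.length) :
    southStep d0.length x (zipW d0 x c, rc) y
    = (zipW d0 x (stepP d0.length (c, rc) y).1, (stepP d0.length (c, rc) y).2) := by
  have hset : ∀ (cc : List String) (i : Int) (w : String), cc.length = d0.length →
      setCell (zipW d0 x cc) i x w = zipW d0 x (PySem.List.pySetD cc i w) :=
    fun cc i w hcc => setCell_zipW d0 x cc i w hcc
  simp only [southStep, stepP]
  rw [read_zipW d0 x c y h hy hx]
  by_cases h1 : c.getD y "" = "#" ∧ 0 < rc
  · rw [if_pos h1, if_pos h1]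
    rw [hset c _ _ h]
    rw [fold_set_zipW d0 x (List.range rc) (fun z => (y : Int) - 1 - (z : Int)) _
      (by rw [PySem.List.length_pySetD]; exact h)]
    simp
  · rw [if_neg h1, if_neg h1]
    by_cases h2 : c.getD y "" = "O"
    · rw [if_pos h2, if_pos h2]
      by_cases h3 : y = d0.length - 1 ∧ 0 < rc + 1
      · rw [if_pos h3, if_pos h3]
        rw [hset c _ _ h]
        rw [hset _ _ _ (by rw [PySem.List.length_pySetD]; exact h)]
        rw [fold_set_zipW d0 x (List.range (rc + 1)) (fun z => (y : Int) - (z : Int)) _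
          (by rw [PySem.List.length_pySetD, PySem.List.length_pySetD]; exact h)]
      · rw [if_neg h3, if_neg h3]
        rw [hset c _ _ h]
    · rw [if_neg h2, if_neg h2]
      by_cases h3 : y = d0.length - 1 ∧ 0 < rc
      · rw [if_pos h3, if_pos h3]
        rw [hset c _ _ h]
        rw [fold_set_zipW d0 x (List.range rc) (fun z => (y : Int) - (z : Int)) _
          (by rw [PySem.List.length_pySetD]; exact h)]
      · rw [if_neg h3, if_neg h3]

lemma fold_lift (d0 : List (List String)) (x : Nat) (hx : ∀ row ∈ d0, x < row.length)
    (l : List Nat) : ∀ (c : List String) (rc : Nat), c.length = d0.length →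
    (∀ y ∈ l, y < d0.length) →
    l.foldl (southStep d0.length x) (zipW d0 x c, rc)
    = (zipW d0 x (l.foldl (stepP d0.length) (c, rc)).1, (l.foldl (stepP d0.length) (c, rc)).2) := by
  induction l with
  | nil => intro c rc h hl; rfl
  | cons y l ih =>
    intro c rc h hl
    simp only [List.foldl_cons]
    rw [step_lift d0 x hx c rc y h (hl y (by simp))]
    rw [ih (stepP d0.length (c, rc) y).1 (stepP d0.length (c, rc) y).2
      (by rw [length_stepP]; exact h) (fun y' hy' => hl y' (by simp [hy']))]

-- A's whole y-loop on column x equals the segment rewrite of that column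
lemma col_lemma (d : List (List String)) (x : Nat) (hne : d ≠ [])
    (hx : ∀ row ∈ d, x < row.length) :
    (List.range d.length).foldl (southStep d.length x) (d, 0)
    = (zipW d x (tilt [] (d.map (fun row => row.getD x ""))), 0) := by
  have hc0 : (d.map (fun row => row.getD x "")).length = d.length := by simp
  have hcne : d.map (fun row => row.getD x "") ≠ [] := by
    simpa using hne
  have hinit : ((d : List (List String)), (0 : Nat))
      = (zipW d x (d.map (fun row => row.getD x "")), 0) := by
    rw [zipW_self d x hx]
  rw [hinit]
  rw [fold_lift d x hx (List.range d.length) _ 0 hc0 (fun y hy => List.mem_range.mp hy)]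
  have hp := pure_main (d.map (fun row => row.getD x "")) [] [] d.length 0 hcne (by simp)
    (by simp)
  simp only [List.map_nil, List.nil_append, List.count_nil, List.length_map] at hp
  rw [← List.range_eq_range'] at hp
  rw [hp]

-- Source B's write-back loop is zipW
lemma enum_fold_eq (x : Nat) (col : List String) : ∀ (pre d : List (List String)),
    col.length = d.length →
    (PySem.List.enumerate col (pre.length : Int)).foldl (fun D p => setCell D p.1 x p.2) (pre ++ d)
    = pre ++ List.zipWith (fun row cv => row.set x cv) d col := by
  induction col with
  | nil =>
    intro pre d hlen
    cases d with
    | nil => simp [PySem.List.enumerate_nil]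
    | cons r d' => simp at hlen
  | cons cv col ih =>
    intro pre d hlen
    cases d with
    | nil => simp at hlen
    | cons r d' =>
      rw [PySem.List.enumerate_cons, List.foldl_cons]
      have hw : setCell (pre ++ r :: d') ((pre.length : Nat) : Int) x cv
          = pre ++ (r.set x cv) :: d' := by
        simp only [setCell, PySem.List.pySetD_natCast, PySem.List.pyGetD_natCast]
        rw [getD_append_mid, set_append_len]
      rw [hw]
      have hs : ((pre.length : Nat) : Int) + 1 = (((pre ++ [r.set x cv]).length : Nat) : Int) := by
        simp
      rw [hs]
      have := ih (pre ++ [r.set x cv]) d' (by simpa using hlen)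
      simp only [List.append_assoc, List.singleton_append] at this
      rw [this]
      simp

lemma shape_zipW (d : List (List String)) (x : Nat) (c : List String)
    (h : c.length = d.length) :
    (zipW d x c).map (fun r => r.length) = d.map (fun r => r.length) := by
  apply List.ext_getElem
  · simp [zipW, h]
  · intro j hj1 hj2
    have hjd : j < d.length := by simpa using hj2
    have hjz : j < (zipW d x c).length := by rw [length_zipW d x c h]; exact hjd
    simp [zipW, List.getElem_zipWith]

lemma outer_lemma (dish : List (List String)) (xs : List Nat)
    (hxs : ∀ x ∈ xs, ∀ row ∈ dish, x < row.length) (hne : dish ≠ []) :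
    ∀ (d : List (List String)), d.map (fun r => r.length) = dish.map (fun r => r.length) →
    xs.foldl (fun st x => (List.range dish.length).foldl (southStep dish.length x) st) (d, 0)
    = (xs.foldl
        (fun d x =>
          let col := d.map (fun row => row.getD x "")
          let out := tiltFold col
          (PySem.List.enumerate out.dropLast 0).foldl (fun d p => setCell d p.1 x p.2) d)
        d, 0) := by
  induction xs with
  | nil => intro d _; rfl
  | cons x xs ih =>
    intro d hshape
    have hdl : d.length = dish.length := by
      have := congrArg List.length hshape
      simpa using this
    have hdne : d ≠ [] := by
      intro h0
      rw [h0] at hdl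
      simp at hdl
      exact hne (List.length_eq_zero_iff.mp (by omega))
    have hxrow : ∀ row ∈ d, x < row.length := by
      intro row hrow
      have hmem : row.length ∈ dish.map (fun r => r.length) := by
        rw [← hshape]
        exact List.mem_map_of_mem hrow
      rcases List.mem_map.mp hmem with ⟨row', hrow', heq⟩
      rw [← heq]
      exact hxs x (by simp) row' hrow'
    have hlenc : (d.map (fun row => row.getD x "")).length = d.length := by simp
    have hcol := col_lemma d x hdne hxrow
    rw [hdl] at hcol
    simp only [List.foldl_cons]
    rw [hcol]
    have hlen2 : ((tiltFold (d.map (fun row => row.getD x ""))).dropLast).length = d.length := by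
      rw [tiltFold_eq, length_tilt]
      simp
    have hB := enum_fold_eq x ((tiltFold (d.map (fun row => row.getD x ""))).dropLast) [] d
      (by simpa using hlen2)
    simp only [List.length_nil, Nat.cast_zero, List.nil_append] at hB
    rw [tiltFold_eq] at hB
    have hshape2 : (zipW d x (tilt [] (d.map (fun row => row.getD x "")))).map (fun r => r.length)
        = dish.map (fun r => r.length) := by
      rw [shape_zipW d x _ (by rw [length_tilt]; simp), hshape]
    have := ih (fun x' hx' => hxs x' (by simp [hx']))
      (zipW d x (tilt [] (d.map (fun row => row.getD x "")))) hshape2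
    rw [this]
    congr 2
    rw [tiltFold_eq]
    exact hB.symm

-- ===== VERDICT (by name: the statement is the Claim_ definition above) =====
theorem south_spec : Claim_equal_south := by
  intro dish hdom hpre
  obtain ⟨hne, hrows⟩ := hpre
  show south dish = south_alt dish
  unfold south south_alt
  rw [outer_lemma dish (List.range (dish.headD []).length)
    (fun x hx row hrow => lt_of_lt_of_le (List.mem_range.mp hx) (hrows row hrow)) hne dish rfl]
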